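-- pv_equiv track=rewrite | github.com/tomhel/AoC | 2019/day15/2.py | calc_oxygen_fill_time
-- ===== SOURCE A (Python) =====
-- def get_delta(direction):
--     deltas = {
--         1: (0, -1),
--         2: (0, 1),
--         3: (-1, 0),
--         4: (1, 0)
--     }
--     return deltas[direction]
--
-- def calc_oxygen_fill_time(grid, pos, time_count, visited):
--     visited.add(pos)
--     times = [time_count]
--     x, y = pos
--
--     for direction in range(1, 5):
--         dx, dy = get_delta(direction)
--         a, b = x + dx, y + dy
--
--         if (a, b) in visited:
--             continue
--
--         if grid.get((a, b), 0) == 1: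
--             times.append(calc_oxygen_fill_time(grid, (a, b), time_count + 1, visited))
--
--     return max(times)
-- ===== SOURCE B (Python) =====
-- def get_delta(direction):
--     deltas = {
--         1: (0, -1),
--         2: (0, 1),
--         3: (-1, 0),
--         4: (1, 0)
--     }
--     return deltas[direction]
--
-- def calc_oxygen_fill_time(grid, pos, time_count, visited):
--     # Iterative DFS: an explicit stack of frames [pos, time, running_max, dir_cursor]
--     # replaces the recursion; cells are marked visited on frame entry and directions
--     # are scanned 1..4 in order, so the traversal (and the result) is identical.
--     visited.add(pos)
--     stack = [[pos, time_count, time_count, 0]]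
--     while True:
--         p, t, rm, di = stack[-1]
--         if di < 4:
--             stack[-1][3] = di + 1
--             dx, dy = get_delta(di + 1)
--             nb = (p[0] + dx, p[1] + dy)
--             if nb not in visited and grid.get(nb, 0) == 1:
--                 visited.add(nb)
--                 stack.append([nb, t + 1, t + 1, 0])
--         else:
--             stack.pop()
--             if stack:
--                 stack[-1][2] = max(stack[-1][2], rm)
--             else:
--                 return rm
-- ===== Notes on version B (the rewrite author's own statement) =====
-- stated objective: alternative
-- what changed: A's recursive DFS (times list + max at the end) is replaced by an explicit iterative stack of frames (pos, time, running max, direction cursor) that simulates the traversal in the same order, marking cells on frame entry and folding each child's maximum into its parent on pop.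
import Mathlib
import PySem

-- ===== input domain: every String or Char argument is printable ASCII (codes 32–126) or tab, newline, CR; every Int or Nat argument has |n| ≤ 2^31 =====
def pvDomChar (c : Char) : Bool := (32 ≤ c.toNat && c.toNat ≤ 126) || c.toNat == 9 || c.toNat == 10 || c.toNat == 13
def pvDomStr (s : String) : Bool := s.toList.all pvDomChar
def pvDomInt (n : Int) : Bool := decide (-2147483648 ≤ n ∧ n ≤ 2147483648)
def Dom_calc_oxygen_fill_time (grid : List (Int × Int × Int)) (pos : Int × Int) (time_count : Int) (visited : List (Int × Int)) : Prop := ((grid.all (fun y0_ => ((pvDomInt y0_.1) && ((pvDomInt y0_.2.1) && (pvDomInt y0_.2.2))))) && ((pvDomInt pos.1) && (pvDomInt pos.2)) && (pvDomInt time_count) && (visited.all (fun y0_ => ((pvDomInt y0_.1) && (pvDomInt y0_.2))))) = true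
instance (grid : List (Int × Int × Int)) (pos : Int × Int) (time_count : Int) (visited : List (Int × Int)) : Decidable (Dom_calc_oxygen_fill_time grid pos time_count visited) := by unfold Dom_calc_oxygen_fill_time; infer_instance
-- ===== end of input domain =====

-- B replaces A's recursive DFS by an explicit iterative stack of frames with the same
-- traversal order (objective: alternative decomposition, same cost). Both Pythons add the
-- same cells to the mutable `visited` set; the theorem is about the return value.

-- ===== PORT A =====
-- helper `get_delta`: the dict literal keyed 1..4 (only ever looked up with 1..4, where this is exact)
def get_delta (direction : Int) : Int × Int :=
  if direction = 1 then (0, -1)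
  else if direction = 2 then (0, 1)
  else if direction = 3 then (-1, 0)
  else (1, 0)

-- grid.get((a,b), 0): the dict arrives as a list of (x, y, value) triples with distinct keys
def gridGetD (grid : List (Int × Int × Int)) (k : Int × Int) : Int :=
  match grid.find? (fun e => e.1 == k.1 && e.2.1 == k.2) with
  | some e => e.2.2
  | none => 0

-- A's recursion, literally: mark pos, times = [time_count], loop direction in range(1,5),
-- skip visited, recurse on open neighbours threading the shared visited set, return max(times).
-- The Nat argument is a Lean-only depth budget for totality: each nested call consumes a fresh
-- grid key, so the budget chosen at the entry point is never exhausted.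
def dfsA (grid : List (Int × Int × Int)) : Nat → (Int × Int) → Int → List (Int × Int) → Int × List (Int × Int)
  | 0, pos, t, vis => (t, PySem.Set.add vis pos)
  | f+1, pos, t, vis =>
    let vis1 := PySem.Set.add vis pos
    let r := (PySem.List.pyRange 1 5 1).foldl (fun st d =>
        let dd := get_delta d
        let nb := (pos.1 + dd.1, pos.2 + dd.2)
        if PySem.Set.contains st.2 nb then st
        else if gridGetD grid nb == 1 then
          let c := dfsA grid f nb (t+1) st.2
          (st.1 ++ [c.1], c.2)
        else st) ([t], vis1)
    ((PySem.List.max? r.1 (fun y => y)).getD 0, r.2)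

def calc_oxygen_fill_time (grid : List (Int × Int × Int)) (pos : Int × Int) (time_count : Int) (visited : List (Int × Int)) : Int :=
  (dfsA grid (grid.length + 1) pos time_count visited).1

-- ===== PORT B =====
-- a stack frame: position, its depth time, running max, next-direction cursor (0-based),
-- and `fu`, the Lean-only depth budget (Source B needs none; see the note on dfsA's budget)
structure PvFrame where
  pos : Int × Int
  t : Int
  rm : Int
  di : Nat
  fu : Nat


-- termination measure for the while loop
def pvW (fr : PvFrame) : Nat := (4 - fr.di) * (2 * 5 ^ fr.fu) + 1
def pvWs (s : List PvFrame) : Nat := (s.map pvW).sum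

-- the three shapes of loop step shrink the measure (cited by runB's decreasing_by)
lemma pvDec_skip (fr : PvFrame) (rest : List PvFrame) (h : fr.di < 4) :
    pvWs ({fr with di := fr.di + 1} :: rest) < pvWs (fr :: rest) := by
  obtain ⟨p0, t0, rm0, di0, fu0⟩ := fr
  replace h : di0 < 4 := h
  simp only [pvWs, List.map_cons, List.sum_cons, pvW]
  have hp : 1 ≤ 5 ^ fu0 := Nat.one_le_pow _ _ (by norm_num)
  have hh : (4 - di0) * (2 * 5 ^ fu0) = (4 - (di0 + 1)) * (2 * 5 ^ fu0) + 2 * 5 ^ fu0 := by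
    have h2 : 4 - di0 = (4 - (di0 + 1)) + 1 := by omega
    rw [h2, Nat.add_mul, Nat.one_mul]
  omega

lemma pvDec_push (nb : Int × Int) (tn : Int) (fr : PvFrame) (rest : List PvFrame) (h : fr.di < 4) :
    pvWs ((⟨nb, tn, tn, if fr.fu = 0 then 4 else 0, fr.fu - 1⟩ : PvFrame) :: {fr with di := fr.di + 1} :: rest)
      < pvWs (fr :: rest) := by
  obtain ⟨p0, t0, rm0, di0, fu0⟩ := fr
  replace h : di0 < 4 := h
  simp only [pvWs, List.map_cons, List.sum_cons, pvW]
  cases fu0 with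
  | zero =>
    simp only [if_true]
    have hh : (4 - di0) * (2 * 5 ^ (0:Nat)) = (4 - (di0 + 1)) * (2 * 5 ^ (0:Nat)) + 2 * 5 ^ (0:Nat) := by
      have h2 : 4 - di0 = (4 - (di0 + 1)) + 1 := by omega
      rw [h2, Nat.add_mul, Nat.one_mul]
    omega
  | succ f' =>
    have hp : 1 ≤ 5 ^ f' := Nat.one_le_pow _ _ (by norm_num)
    have h5 : (2 : Nat) * 5 ^ (f' + 1) = 10 * 5 ^ f' := by ring
    have hh : (4 - di0) * (2 * 5 ^ (f' + 1)) = (4 - (di0 + 1)) * (2 * 5 ^ (f' + 1)) + 2 * 5 ^ (f' + 1) := by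
      have h2 : 4 - di0 = (4 - (di0 + 1)) + 1 := by omega
      rw [h2, Nat.add_mul, Nat.one_mul]
    rw [if_neg (Nat.succ_ne_zero f'), Nat.add_sub_cancel, hh, h5]
    omega

lemma pvDec_pop (fr p : PvFrame) (x : Int) (rs : List PvFrame) :
    pvWs ({p with rm := x} :: rs) < pvWs (fr :: p :: rs) := by
  obtain ⟨p0, t0, rm0, di0, fu0⟩ := fr
  obtain ⟨p1, t1, rm1, di1, fu1⟩ := p
  simp only [pvWs, List.map_cons, List.sum_cons, pvW]
  omega

-- the while loop of Source B: advance the top frame's cursor; push a freshly marked child on an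
-- unvisited open neighbour; on cursor exhaustion pop, folding the running max into the parent.
-- A child pushed with exhausted budget starts with its cursor already past the end (unreachable
-- for the budget chosen at the entry point).
def runB (grid : List (Int × Int × Int)) : List PvFrame → List (Int × Int) → Int
  | [], _ => 0  -- unreachable: the loop returns when the stack empties
  | fr :: rest, vis =>
    if h4 : fr.di < 4 then
      let dd := get_delta ((fr.di : Int) + 1)
      let nb := (fr.pos.1 + dd.1, fr.pos.2 + dd.2)
      if PySem.Set.contains vis nb then
        runB grid ({fr with di := fr.di + 1} :: rest) vis
      else if gridGetD grid nb == 1 then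
        runB grid (⟨nb, fr.t + 1, fr.t + 1, if fr.fu = 0 then 4 else 0, fr.fu - 1⟩ :: {fr with di := fr.di + 1} :: rest) (PySem.Set.add vis nb)
      else
        runB grid ({fr with di := fr.di + 1} :: rest) vis
    else
      match rest with
      | [] => fr.rm
      | p :: rs => runB grid ({p with rm := max p.rm fr.rm} :: rs) vis
termination_by s _ => pvWs s
decreasing_by
  · exact pvDec_skip fr rest h4
  · exact pvDec_push _ _ fr rest h4
  · exact pvDec_skip fr rest h4
  · exact pvDec_pop fr p _ rs

def calc_oxygen_fill_time_alt (grid : List (Int × Int × Int)) (pos : Int × Int) (time_count : Int) (visited : List (Int × Int)) : Int :=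
  runB grid [⟨pos, time_count, time_count, 0, grid.length⟩] (PySem.Set.add visited pos)

-- ===== PRECONDITION & SPEC =====
def Spec_calc_oxygen_fill_time (grid : List (Int × Int × Int)) (pos : Int × Int) (time_count : Int) (visited : List (Int × Int)) (out : Int) : Prop := out = calc_oxygen_fill_time_alt grid pos time_count visited
instance (grid : List (Int × Int × Int)) (pos : Int × Int) (time_count : Int) (visited : List (Int × Int)) (out : Int) : Decidable (Spec_calc_oxygen_fill_time grid pos time_count visited out) := by unfold Spec_calc_oxygen_fill_time; infer_instance

-- ===== CLAIM (what is proved, stated in full; the proofs are below) =====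
def Claim_equal_calc_oxygen_fill_time : Prop := ∀ (grid : List (Int × Int × Int)) (pos : Int × Int) (time_count : Int) (visited : List (Int × Int)), Dom_calc_oxygen_fill_time grid pos time_count visited → Spec_calc_oxygen_fill_time grid pos time_count visited (calc_oxygen_fill_time grid pos time_count visited)

-- ===== LEMMAS AND PROOFS =====

-- the per-direction sweep of one frame, with a running maximum instead of A's `times` list;
-- `f` is the budget handed to children
def dfsDirs (grid : List (Int × Int × Int)) (f : Nat) (pos : Int × Int) (t : Int) : List Int → Int → List (Int × Int) → Int × List (Int × Int)
  | [], rm, vis => (rm, vis)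
  | d :: ds, rm, vis =>
    let dd := get_delta d
    let nb := (pos.1 + dd.1, pos.2 + dd.2)
    if PySem.Set.contains vis nb then dfsDirs grid f pos t ds rm vis
    else if gridGetD grid nb == 1 then
      let c := dfsA grid f nb (t+1) vis
      dfsDirs grid f pos t ds (max rm c.1) c.2
    else dfsDirs grid f pos t ds rm vis

def mxL (ts : List Int) : Int := (PySem.List.max? ts (fun y => y)).getD 0

lemma mxL_append (ts : List Int) (h : ts ≠ []) (x : Int) : mxL (ts ++ [x]) = max (mxL ts) x := by
  cases ts with
  | nil => exact absurd rfl h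
  | cons a tl =>
    simp [mxL, PySem.List.max?_id_cons, List.foldl_append]

lemma mxL_single (x : Int) : mxL [x] = x := by
  simp [mxL, PySem.List.max?_id_cons]

-- A's foldl over the remaining directions, with the `times` list collapsed to its maximum,
-- is the running-max sweep dfsDirs
lemma foldA_eq_dfsDirs (grid : List (Int × Int × Int)) (f : Nat) (pos : Int × Int) (t : Int) :
    ∀ (ds : List Int) (ts : List Int) (vis : List (Int × Int)), ts ≠ [] →
    (mxL (ds.foldl (fun st d =>
        let dd := get_delta d
        let nb := (pos.1 + dd.1, pos.2 + dd.2)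
        if PySem.Set.contains st.2 nb then st
        else if gridGetD grid nb == 1 then
          let c := dfsA grid f nb (t+1) st.2
          (st.1 ++ [c.1], c.2)
        else st) (ts, vis)).1,
     (ds.foldl (fun st d =>
        let dd := get_delta d
        let nb := (pos.1 + dd.1, pos.2 + dd.2)
        if PySem.Set.contains st.2 nb then st
        else if gridGetD grid nb == 1 then
          let c := dfsA grid f nb (t+1) st.2
          (st.1 ++ [c.1], c.2)
        else st) (ts, vis)).2)
      = dfsDirs grid f pos t ds (mxL ts) vis := by
  intro ds
  induction ds with
  | nil => intro ts vis h; simp [dfsDirs]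
  | cons d ds ih =>
    intro ts vis h
    simp only [List.foldl_cons, dfsDirs]
    by_cases hc : PySem.Set.contains vis (pos.1 + (get_delta d).1, pos.2 + (get_delta d).2) = true
    · simp only [hc, if_true]
      exact ih ts vis h
    · rw [Bool.not_eq_true] at hc
      by_cases hg : (gridGetD grid (pos.1 + (get_delta d).1, pos.2 + (get_delta d).2) == 1) = true
      · simp only [hc, hg, if_true, Bool.false_eq_true, if_false]
        rw [← mxL_append ts h]
        exact ih _ _ (by simp)
      · rw [Bool.not_eq_true] at hg
        simp only [hc, hg, Bool.false_eq_true, if_false]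
        exact ih ts vis h

lemma dfsA_succ (grid : List (Int × Int × Int)) (f : Nat) (pos : Int × Int) (t : Int) (vis : List (Int × Int)) :
    dfsA grid (f+1) pos t vis = dfsDirs grid f pos t [1,2,3,4] t (PySem.Set.add vis pos) := by
  have hr : PySem.List.pyRange 1 5 1 = ([1,2,3,4] : List Int) := by decide
  rw [show dfsA grid (f+1) pos t vis =
      ((PySem.List.max? ((PySem.List.pyRange 1 5 1).foldl (fun st d =>
        let dd := get_delta d
        let nb := (pos.1 + dd.1, pos.2 + dd.2)
        if PySem.Set.contains st.2 nb then st
        else if gridGetD grid nb == 1 then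
          let c := dfsA grid f nb (t+1) st.2
          (st.1 ++ [c.1], c.2)
        else st) ([t], PySem.Set.add vis pos)).1 (fun y => y)).getD 0,
       ((PySem.List.pyRange 1 5 1).foldl (fun st d =>
        let dd := get_delta d
        let nb := (pos.1 + dd.1, pos.2 + dd.2)
        if PySem.Set.contains st.2 nb then st
        else if gridGetD grid nb == 1 then
          let c := dfsA grid f nb (t+1) st.2
          (st.1 ++ [c.1], c.2)
        else st) ([t], PySem.Set.add vis pos)).2) from rfl]
  rw [hr]
  have := foldA_eq_dfsDirs grid f pos t [1,2,3,4] [t] (PySem.Set.add vis pos) (by simp)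
  rw [← mxL_single t]
  exact this

-- what happens after a frame finishes with running max rm: fold into the parent, or return
def popCont (grid : List (Int × Int × Int)) : List PvFrame → Int → List (Int × Int) → Int
  | [], rm, _ => rm
  | p :: rs, rm, vis => runB grid ({p with rm := max p.rm rm} :: rs) vis

lemma runB_pop (grid : List (Int × Int × Int)) (pos : Int × Int) (t rm : Int) (f : Nat) (vis : List (Int × Int)) (stack : List PvFrame) :
    runB grid (⟨pos, t, rm, 4, f⟩ :: stack) vis = popCont grid stack rm vis := by
  rw [runB.eq_def]
  cases stack <;> simp [popCont]

lemma dfsA_zero (grid : List (Int × Int × Int)) (pos : Int × Int) (t : Int) (vis : List (Int × Int)) :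
    dfsA grid 0 pos t vis = (t, PySem.Set.add vis pos) := rfl

lemma drop_dirs (di : Nat) (h : di < 4) :
    (([1,2,3,4] : List Int)).drop di = ((di : Int) + 1) :: ([1,2,3,4] : List Int).drop (di + 1) := by
  interval_cases di <;> decide

-- the simulation: a frame with cursor di behaves like the running-max sweep over the
-- remaining directions, then resumes the rest of the stack
lemma sim_step (grid : List (Int × Int × Int)) (f : Nat)
    (hchild : ∀ (nb : Int × Int) (tc : Int) (vis : List (Int × Int)) (stack' : List PvFrame),
      runB grid (⟨nb, tc, tc, if f = 0 then 4 else 0, f - 1⟩ :: stack') (PySem.Set.add vis nb)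
        = popCont grid stack' (dfsA grid f nb tc vis).1 (dfsA grid f nb tc vis).2) :
    ∀ (k di : Nat), di ≤ 4 → 4 - di = k → ∀ (pos : Int × Int) (t rm : Int) (vis : List (Int × Int)) (stack : List PvFrame),
    runB grid (⟨pos, t, rm, di, f⟩ :: stack) vis
      = popCont grid stack (dfsDirs grid f pos t (([1,2,3,4] : List Int).drop di) rm vis).1
          (dfsDirs grid f pos t (([1,2,3,4] : List Int).drop di) rm vis).2 := by
  intro k
  induction k with
  | zero =>
    intro di hle hk pos t rm vis stack
    have hdi : di = 4 := by omega
    subst hdi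
    rw [runB_pop]
    simp [dfsDirs]
  | succ k ihk =>
    intro di hle hk pos t rm vis stack
    have h4 : di < 4 := by omega
    rw [drop_dirs di h4, runB.eq_def]
    simp only [dif_pos h4, dfsDirs]
    by_cases hc : PySem.Set.contains vis (pos.1 + (get_delta ((di : Int) + 1)).1, pos.2 + (get_delta ((di : Int) + 1)).2) = true
    · simp only [hc, if_true]
      exact ihk (di + 1) (by omega) (by omega) pos t rm vis stack
    · rw [Bool.not_eq_true] at hc
      by_cases hg : (gridGetD grid (pos.1 + (get_delta ((di : Int) + 1)).1, pos.2 + (get_delta ((di : Int) + 1)).2) == 1) = true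
      · simp only [hc, hg, if_true, Bool.false_eq_true, if_false]
        rw [hchild]
        simp only [popCont]
        exact ihk (di + 1) (by omega) (by omega) pos t _ _ stack
      · rw [Bool.not_eq_true] at hg
        simp only [hc, hg, Bool.false_eq_true, if_false]
        exact ihk (di + 1) (by omega) (by omega) pos t rm vis stack

lemma runB_sim (grid : List (Int × Int × Int)) :
    ∀ (f : Nat) (di : Nat), di ≤ 4 → ∀ (pos : Int × Int) (t rm : Int) (vis : List (Int × Int)) (stack : List PvFrame),
    runB grid (⟨pos, t, rm, di, f⟩ :: stack) vis
      = popCont grid stack (dfsDirs grid f pos t (([1,2,3,4] : List Int).drop di) rm vis).1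
          (dfsDirs grid f pos t (([1,2,3,4] : List Int).drop di) rm vis).2 := by
  intro f
  induction f with
  | zero =>
    intro di hle pos t rm vis stack
    refine sim_step grid 0 ?_ (4 - di) di hle rfl pos t rm vis stack
    intro nb tc vis' stack'
    simp only [dfsA_zero]
    exact runB_pop grid nb tc tc 0 (PySem.Set.add vis' nb) stack'
  | succ f' ihf =>
    intro di hle pos t rm vis stack
    refine sim_step grid (f' + 1) ?_ (4 - di) di hle rfl pos t rm vis stack
    intro nb tc vis' stack'
    rw [if_neg (Nat.succ_ne_zero f'), Nat.add_sub_cancel, dfsA_succ]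
    exact ihf 0 (by omega) nb tc tc (PySem.Set.add vis' nb) stack'

theorem pv_main (grid : List (Int × Int × Int)) (pos : Int × Int) (t : Int) (visited : List (Int × Int)) :
    calc_oxygen_fill_time grid pos t visited = calc_oxygen_fill_time_alt grid pos t visited := by
  unfold calc_oxygen_fill_time calc_oxygen_fill_time_alt
  rw [dfsA_succ, runB_sim grid grid.length 0 (by omega)]
  simp [popCont]

-- ===== VERDICT (by name: the statement is the Claim_ definition above) =====
theorem calc_oxygen_fill_time_spec : Claim_equal_calc_oxygen_fill_time := by
  intro grid pos t visited _
  unfold Spec_calc_oxygen_fill_time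
  exact pv_main grid pos t visited
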